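-- pv_equiv track=rewrite | github.com/alexlitz/cllm_temp | old/test_bootstrap.py | parse_xc_bytecode
-- ===== SOURCE A (Python) =====
-- def parse_xc_bytecode(output):
--     """Parse xc_dump output to extract bytecode.
--
--     xc_dump outputs:
--     === BYTECODE ===
--     6
--     0
--     1
--     6
--     ...
--     === END ===
--     MAIN:0
--
--     Bytecode is a stream where some ops have immediates following.
--     We need to pack them for our VM (op | imm << 8).
--     """
--     # Opcodes that take an immediate argument
--     OPS_WITH_IMM = {0, 1, 2, 3, 4, 5, 6, 7}  # LEA, IMM, JMP, JSR, JZ/BZ, JNZ/BNZ, ENT, ADJ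
--
--     lines = output.strip().split('\n')
--
--     # Find bytecode section
--     in_bytecode = False
--     raw_bytecode = []
--     main_offset = 0
--
--     for line in lines:
--         line = line.strip()
--         if line == "=== BYTECODE ===":
--             in_bytecode = True
--             continue
--         if line == "=== END ===":
--             in_bytecode = False
--             continue
--         if line.startswith("MAIN:"):
--             main_offset = int(line.replace("MAIN:", ""))
--             continue
--         if in_bytecode and line:
--             try:
--                 raw_bytecode.append(int(line))
--             except:
--                 pass
--
--     # Pack bytecode: combine op with following immediate
--     packed = []
--     i = 0
--     while i < len(raw_bytecode):
--         op = raw_bytecode[i]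
--         if op in OPS_WITH_IMM and i + 1 < len(raw_bytecode):
--             imm = raw_bytecode[i + 1]
--             packed.append(op | (imm << 8))
--             i += 2
--         else:
--             packed.append(op)
--             i += 1
--
--     return packed, main_offset
-- ===== SOURCE B (Python) =====
-- def parse_xc_bytecode(output):
--     OPS_WITH_IMM = {0, 1, 2, 3, 4, 5, 6, 7}
--     packed = []
--     main_offset = 0
--     in_bytecode = False
--     pending = None
--     for line in output.strip().split('\n'):
--         line = line.strip()
--         if line == "=== BYTECODE ===":
--             in_bytecode = True
--         elif line == "=== END ===":
--             in_bytecode = False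
--         elif line.startswith("MAIN:"):
--             main_offset = int(line.replace("MAIN:", ""))
--         elif in_bytecode and line:
--             try:
--                 v = int(line)
--             except ValueError:
--                 continue
--             if pending is not None:
--                 packed.append(pending | (v << 8))
--                 pending = None
--             elif v in OPS_WITH_IMM:
--                 pending = v
--             else:
--                 packed.append(v)
--     if pending is not None:
--         packed.append(pending)
--     return packed, main_offset
-- ===== Notes on version B (the rewrite author's own statement) =====
-- stated objective: alternative
-- what changed: A collects a raw_bytecode list in one pass and then packs it with an index-stepping while loop; B is a single fused pass over the lines that maintains a pending-op variable and emits packed words immediately, flushing a trailing pending op at the end, with no intermediate raw list.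
-- outside the precondition, e.g. on parse_xc_bytecode('=== BYTECODE ===\nMAIN:x'): A raises ValueError, B raises ValueError; on parse_xc_bytecode('MAIN:'): A raises ValueError, B raises ValueError
import Mathlib
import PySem

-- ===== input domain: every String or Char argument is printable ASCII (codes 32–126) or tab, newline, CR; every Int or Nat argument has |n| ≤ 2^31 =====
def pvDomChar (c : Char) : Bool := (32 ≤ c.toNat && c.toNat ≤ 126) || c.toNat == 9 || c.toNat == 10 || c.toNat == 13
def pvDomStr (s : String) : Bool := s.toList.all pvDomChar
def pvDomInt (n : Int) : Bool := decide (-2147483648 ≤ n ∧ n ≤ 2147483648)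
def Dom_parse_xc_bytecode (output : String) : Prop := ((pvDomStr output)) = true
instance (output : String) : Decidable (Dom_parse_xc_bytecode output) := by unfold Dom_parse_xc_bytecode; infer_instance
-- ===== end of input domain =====

-- B fuses A's two passes (collect raw ints, then pack by index-stepping while loop) into one
-- pass over the lines with a `pending` op variable; same return value, different decomposition.

-- ===== PORT A =====
def pvOpsWithImm : PySem.Set Int := PySem.Set.ofList [0, 1, 2, 3, 4, 5, 6, 7]

-- one iteration of A's `for line in lines` loop; state = (in_bytecode, raw_bytecode, main_offset)
def pvA_line (st : Bool × List Int × Int) (line : String) : Bool × List Int × Int :=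
  let line := PySem.Str.strip line
  if line = "=== BYTECODE ===" then (true, st.2.1, st.2.2)
  else if line = "=== END ===" then (false, st.2.1, st.2.2)
  else if PySem.Str.startswith line "MAIN:" then
    match PySem.Int.ofStr? (PySem.Str.replace line "MAIN:" "") with
    | some m => (st.1, st.2.1, m)
    | none => (st.1, st.2.1, st.2.2)   -- Python raises ValueError here; excluded by Pre_
  else if st.1 = true ∧ line ≠ "" then
    match PySem.Int.ofStr? line with
    | some v => (st.1, st.2.1 ++ [v], st.2.2)
    | none => st                       -- bare `except: pass`
  else st

-- A's `while i < len(raw_bytecode)` packing loop; two-deep match = the `i + 1 < len` test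
def pvA_pack : List Int → List Int
  | [] => []
  | [op] => [op]
  | op :: imm :: rest =>
    if PySem.Set.contains pvOpsWithImm op then
      PySem.Int.bor op (imm <<< (8 : Nat)) :: pvA_pack rest
    else
      op :: pvA_pack (imm :: rest)

-- output.strip().split('\n'); split? is none only for sep = "", so the [] branch is unreachable
def pvLines (output : String) : List String :=
  match PySem.Str.split? (PySem.Str.strip output) "\n" with
  | some ls => ls
  | none => []

def parse_xc_bytecode (output : String) : List Int × Int :=
  let lines := pvLines output
  let st := lines.foldl pvA_line (false, [], 0)
  (pvA_pack st.2.1, st.2.2)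

-- ===== PORT B =====
-- one iteration of B's single fused loop; state = (in_bytecode, packed, pending, main_offset)
def pvB_line (st : Bool × List Int × Option Int × Int) (line : String) :
    Bool × List Int × Option Int × Int :=
  let line := PySem.Str.strip line
  if line = "=== BYTECODE ===" then (true, st.2.1, st.2.2.1, st.2.2.2)
  else if line = "=== END ===" then (false, st.2.1, st.2.2.1, st.2.2.2)
  else if PySem.Str.startswith line "MAIN:" then
    match PySem.Int.ofStr? (PySem.Str.replace line "MAIN:" "") with
    | some m => (st.1, st.2.1, st.2.2.1, m)
    | none => (st.1, st.2.1, st.2.2.1, st.2.2.2)   -- Python raises ValueError; excluded by Pre_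
  else if st.1 = true ∧ line ≠ "" then
    match PySem.Int.ofStr? line with
    | none => st
    | some v =>
      match st.2.2.1 with
      | some p => (st.1, st.2.1 ++ [PySem.Int.bor p (v <<< (8 : Nat))], none, st.2.2.2)
      | none =>
        if PySem.Set.contains pvOpsWithImm v then (st.1, st.2.1, some v, st.2.2.2)
        else (st.1, st.2.1 ++ [v], none, st.2.2.2)
  else st

def parse_xc_bytecode_alt (output : String) : List Int × Int :=
  let st := (pvLines output).foldl pvB_line (false, [], none, 0)
  let packed := match st.2.2.1 with
    | some p => st.2.1 ++ [p]   -- flush a trailing pending op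
    | none => st.2.1
  (packed, st.2.2.2)

-- ===== PRECONDITION & SPEC =====
-- Pre_ excludes exactly the inputs where A raises ValueError: a stripped line starting with
-- "MAIN:" whose remainder after removing every "MAIN:" is not a valid int literal.
def Pre_parse_xc_bytecode (output : String) : Prop :=
  ∀ line ∈ pvLines output,
    PySem.Str.startswith (PySem.Str.strip line) "MAIN:" = true →
      (PySem.Int.ofStr? (PySem.Str.replace (PySem.Str.strip line) "MAIN:" "")).isSome = true
instance (output : String) : Decidable (Pre_parse_xc_bytecode output) := by
  unfold Pre_parse_xc_bytecode; infer_instance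

def pvWitness_parse_xc_bytecode : String :=
  "=== BYTECODE ===\n6\n0\n1\n6\n=== END ===\nMAIN:0"

def Spec_parse_xc_bytecode (output : String) (out : List Int × Int) : Prop := out = parse_xc_bytecode_alt output
instance (output : String) (out : List Int × Int) : Decidable (Spec_parse_xc_bytecode output out) := by unfold Spec_parse_xc_bytecode; infer_instance

-- ===== CLAIM (what is proved, stated in full; the proofs are below) =====
def Claim_equal_parse_xc_bytecode : Prop := ∀ (output : String), Dom_parse_xc_bytecode output → Pre_parse_xc_bytecode output → Spec_parse_xc_bytecode output (parse_xc_bytecode output)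

-- ===== LEMMAS AND PROOFS =====

-- proof-only helper: the packing step B performs on each accepted integer
def pvStep (s : List Int × Option Int) (v : Int) : List Int × Option Int :=
  match s.2 with
  | some p => (s.1 ++ [PySem.Int.bor p (v <<< (8 : Nat))], none)
  | none =>
    if PySem.Set.contains pvOpsWithImm v then (s.1, some v)
    else (s.1 ++ [v], none)

-- proof-only helper: flush the pending op
def pvFlush (s : List Int × Option Int) : List Int :=
  match s.2 with
  | some p => s.1 ++ [p]
  | none => s.1

def pvF (raw : List Int) : List Int × Option Int := raw.foldl pvStep ([], none)

-- folding pvStep from a clean (acc, none) state and flushing = acc ++ A's packing loop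
theorem pvStep_fold_eq_pack (raw : List Int) :
    ∀ acc : List Int, pvFlush (raw.foldl pvStep (acc, none)) = acc ++ pvA_pack raw := by
  fun_induction pvA_pack raw with
  | case1 => intro acc; simp [pvFlush]
  | case2 op =>
    intro acc
    simp only [List.foldl_cons, List.foldl_nil]
    unfold pvStep pvFlush
    split_ifs <;> simp
  | case3 op imm rest h ih =>
    intro acc
    rw [List.foldl_cons, List.foldl_cons]
    have h' : op ∈ pvOpsWithImm := by simpa using h
    have e1 : pvStep (acc, none) op = (acc, some op) := by simp [pvStep, h']
    have e2 : pvStep (acc, some op) imm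
        = (acc ++ [PySem.Int.bor op (imm <<< (8 : Nat))], none) := by simp [pvStep]
    rw [e1, e2, ih]
    simp
  | case4 op imm rest h ih =>
    intro acc
    rw [List.foldl_cons]
    have h' : op ∉ pvOpsWithImm := by simpa using h
    have e1 : pvStep (acc, none) op = (acc ++ [op], none) := by simp [pvStep, h']
    rw [e1, ih]
    simp

-- one line of B from a state tied to one line of A's state
theorem pvStep_line (line : String) (inb : Bool) (raw : List Int) (main : Int) :
    pvB_line (inb, (pvF raw).1, (pvF raw).2, main) line
      = ((pvA_line (inb, raw, main) line).1,
         (pvF ((pvA_line (inb, raw, main) line).2.1)).1,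
         (pvF ((pvA_line (inb, raw, main) line).2.1)).2,
         (pvA_line (inb, raw, main) line).2.2) := by
  unfold pvA_line pvB_line
  dsimp only
  split_ifs with h1 h2 h3 h4
  · rfl
  · rfl
  · cases PySem.Int.ofStr? (PySem.Str.replace (PySem.Str.strip line) "MAIN:" "") <;> rfl
  · cases hv : PySem.Int.ofStr? (PySem.Str.strip line) with
    | none => rfl
    | some v =>
      have hF : pvF (raw ++ [v]) = pvStep (pvF raw) v := by
        simp [pvF, List.foldl_append]
      simp only [hF]
      cases hp : (pvF raw).2 with
      | some p => simp [pvStep, hp]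
      | none =>
        by_cases hc : v ∈ pvOpsWithImm <;> simp [pvStep, hp, hc]
  · rfl

-- the invariant through the whole line fold
theorem pvLine_fold_invariant (lines : List String) :
    ∀ (inb : Bool) (raw : List Int) (main : Int),
      lines.foldl pvB_line (inb, (pvF raw).1, (pvF raw).2, main)
        = ((lines.foldl pvA_line (inb, raw, main)).1,
           (pvF ((lines.foldl pvA_line (inb, raw, main)).2.1)).1,
           (pvF ((lines.foldl pvA_line (inb, raw, main)).2.1)).2,
           (lines.foldl pvA_line (inb, raw, main)).2.2) := by
  induction lines with
  | nil => intro inb raw main; rfl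
  | cons line rest ih =>
    intro inb raw main
    simp only [List.foldl_cons, pvStep_line line inb raw main]
    exact ih _ _ _

-- ===== VERDICT (by name: the statement is the Claim_ definition above) =====
theorem parse_xc_bytecode_spec : Claim_equal_parse_xc_bytecode := by
  intro output _ _
  unfold Spec_parse_xc_bytecode parse_xc_bytecode parse_xc_bytecode_alt
  have hinv := pvLine_fold_invariant (pvLines output) false [] 0
  have h0 : pvF [] = ([], none) := rfl
  rw [h0] at hinv
  rw [hinv]
  have hpack := pvStep_fold_eq_pack
    (((pvLines output).foldl pvA_line (false, [], 0)).2.1) []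
  simp only [List.nil_append] at hpack
  unfold pvFlush at hpack
  unfold pvF
  cases hp : (((pvLines output).foldl pvA_line (false, [], 0)).2.1).foldl pvStep ([], none) with
  | mk l pend =>
    rw [hp] at hpack
    cases pend <;> simp_all
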